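-- pv_equiv track=rewrite | github.com/myshevchuk/inbox_analyzer | inbox_analyzer.py | build_sender_index
-- ===== SOURCE A (Python) =====
-- def build_sender_index(config: dict) -> dict[str, str]:
--     """Build a mapping from lowercase folder leaf name to full folder path.
--
--     Iterates over rules with a move_to key and extracts the leaf segment
--     (the last dot-separated component of the folder path).  The leaf is
--     lowercased and used as the key.  On collision (two folders share the
--     same lowercase leaf), the alphabetically first full path is kept.
--
--     Example:
--         rules with move_to values ["Apps.Spotify", "Apps.Music Production"]
--         ->  {"spotify": "Apps.Spotify", "music production": "Apps.Music Production"}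
--     """
--     index: dict[str, str] = {}
--     for rule in config.get("rules", []):
--         folder = rule.get("move_to")
--         if not folder:
--             continue
--         leaf = folder.split(".")[-1].lower()
--         if leaf not in index or folder < index[leaf]:
--             index[leaf] = folder
--     return index
-- ===== SOURCE B (Python) =====
-- def build_sender_index(config: dict) -> dict[str, str]:
--     """Two staged passes: first collect the truthy move_to folder paths,
--     then build the index with a dict comprehension that maps each leaf to
--     the alphabetical minimum of the full paths sharing that leaf."""
--     folders = [r.get("move_to") for r in config.get("rules", []) if r.get("move_to")]
--     leaves = [f.split(".")[-1].lower() for f in folders]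
--     return {leaf: min(f for f, l in zip(folders, leaves) if l == leaf)
--             for leaf in leaves}
-- ===== Notes on version B (the rewrite author's own statement) =====
-- stated objective: alternative
-- what changed: B replaces A's single loop with a running per-leaf minimum (compare-and-overwrite on collision) by two staged passes: it first materialises the list of truthy move_to paths and their lowercase leaves, then a dict comprehension maps each leaf to the alphabetical minimum of the full paths sharing that leaf, computed by a scan over the collected list.
import Mathlib
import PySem

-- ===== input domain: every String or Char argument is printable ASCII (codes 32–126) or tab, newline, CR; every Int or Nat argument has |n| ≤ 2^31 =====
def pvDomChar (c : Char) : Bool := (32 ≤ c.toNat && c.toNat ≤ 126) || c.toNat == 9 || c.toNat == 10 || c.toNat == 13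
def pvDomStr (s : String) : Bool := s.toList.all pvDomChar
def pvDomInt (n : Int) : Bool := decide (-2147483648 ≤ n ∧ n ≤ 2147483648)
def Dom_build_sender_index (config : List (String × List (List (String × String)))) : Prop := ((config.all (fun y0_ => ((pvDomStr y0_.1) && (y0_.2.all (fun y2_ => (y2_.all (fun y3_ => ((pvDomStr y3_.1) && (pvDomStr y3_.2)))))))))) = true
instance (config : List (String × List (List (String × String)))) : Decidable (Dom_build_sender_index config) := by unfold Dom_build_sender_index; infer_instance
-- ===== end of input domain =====

-- B replaces A's running per-leaf minimum with two staged passes: collect the truthy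
-- move_to paths and their leaves, then a dict comprehension takes each leaf's group minimum;
-- an alternative decomposition of the same result (not claimed faster).

-- leaf = folder.split(".")[-1].lower()   (split with a separator never yields [], so the
-- .getD [] default of the [-1] indexing is unreachable; exact)
def pvLeaf (folder : String) : String :=
  String.ofList (PySem.Chars.lower
    ((PySem.List.pyGet? (PySem.Chars.splitOn folder.toList ['.']) (-1)).getD []))

-- ===== PORT A =====
-- loop body of A: running per-leaf minimum
def pvStepA (index : PySem.Dict String String) (rule : List (String × String)) :
    PySem.Dict String String :=
  match (PySem.Dict.mk rule).get? "move_to" with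
  | none => index
  | some folder =>
    if folder = "" then index
    else
      let leaf := pvLeaf folder
      match index.get? leaf with
      | none => index.insert leaf folder
      | some cur =>
        if PySem.Chars.strLt folder.toList cur.toList then index.insert leaf folder
        else index

def build_sender_index (config : List (String × List (List (String × String)))) : List (String × String) :=
  (((PySem.Dict.mk config).getD "rules" []).foldl pvStepA PySem.Dict.empty).items

-- ===== PORT B =====
-- r.get("move_to") filtered by truthiness (None or "" is dropped)
def pvMoveTo (rule : List (String × String)) : Option String :=
  match (PySem.Dict.mk rule).get? "move_to" with
  | none => none
  | some f => if f = "" then none else some f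

-- min(f for f, l in zip(folders, leaves) if l == leaf), Python's string comparison
def pvGroupMin (folders leaves : List String) (leaf : String) : String :=
  (PySem.List.min? (((folders.zip leaves).filter (fun p => p.2 == leaf)).map Prod.fst)
      (fun s => s.toList)).getD ""

def build_sender_index_alt (config : List (String × List (List (String × String)))) : List (String × String) :=
  let folders := ((PySem.Dict.mk config).getD "rules" []).filterMap pvMoveTo
  let leaves := folders.map pvLeaf
  -- the dict comprehension: iterate leaves, overwriting insert
  (leaves.foldl (fun d leaf => d.insert leaf (pvGroupMin folders leaves leaf))
      PySem.Dict.empty).items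

-- ===== PRECONDITION & SPEC =====
def Spec_build_sender_index (config : List (String × List (List (String × String)))) (out : List (String × String)) : Prop := out = build_sender_index_alt config
instance (config : List (String × List (List (String × String)))) (out : List (String × String)) : Decidable (Spec_build_sender_index config out) := by unfold Spec_build_sender_index; infer_instance

-- ===== CLAIM (what is proved, stated in full; the proofs are below) =====
def Claim_equal_build_sender_index : Prop := ∀ (config : List (String × List (List (String × String)))), Dom_build_sender_index config → Spec_build_sender_index config (build_sender_index config)

-- ===== LEMMAS AND PROOFS =====

-- the alphabetical group minimum over a plain folder list
def pvM (F : List String) (l : String) : String :=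
  (PySem.List.min? (F.filter (fun f => pvLeaf f == l)) (fun s => s.toList)).getD ""

-- first-occurrence deduplication, written as the left fold it stands for
def pvDedup (L : List String) : List String :=
  L.foldl (fun a x => if x ∈ a then a else a ++ [x]) []

theorem pv_dedup_append (L : List String) (x : String) :
    pvDedup (L ++ [x]) = if x ∈ pvDedup L then pvDedup L else pvDedup L ++ [x] := by
  simp [pvDedup, List.foldl_append]

theorem pv_mem_foldl_dedup (L : List String) (a : String) :
    ∀ acc, a ∈ L.foldl (fun a x => if x ∈ a then a else a ++ [x]) acc ↔ a ∈ acc ∨ a ∈ L := by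
  induction L with
  | nil => intro acc; simp
  | cons y t ih =>
    intro acc
    rw [List.foldl_cons, ih]
    by_cases hy : y ∈ acc
    · simp [hy]
      constructor
      · rintro (h | h)
        · exact Or.inl h
        · exact Or.inr (Or.inr h)
      · rintro (h | h | h)
        · exact Or.inl h
        · exact Or.inl (h ▸ hy)
        · exact Or.inr h
    · simp [hy, List.mem_append]
      tauto
  
theorem pv_mem_dedup (L : List String) (a : String) : a ∈ pvDedup L ↔ a ∈ L := by
  rw [pvDedup, pv_mem_foldl_dedup]
  simp

theorem pv_nodup_dedup (L : List String) : (pvDedup L).Nodup := by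
  have h : ∀ acc : List String, acc.Nodup →
      (L.foldl (fun a x => if x ∈ a then a else a ++ [x]) acc).Nodup := by
    induction L with
    | nil => intro acc h; exact h
    | cons y t ih =>
      intro acc hacc
      rw [List.foldl_cons]
      by_cases hy : y ∈ acc
      · rw [if_pos hy]; exact ih acc hacc
      · rw [if_neg hy]
        refine ih _ ?_
        simp [List.nodup_append, hacc]
        intro a ha h
        exact hy (h ▸ ha)
  exact h [] List.nodup_nil

-- lookup in a dict built by mapping a value function over (distinct or not) keys
theorem pv_get?_mk_mapfun (g : String → String) (L : List String) (k : String) :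
    (PySem.Dict.mk (L.map (fun l => (l, g l)))).get? k
      = if k ∈ L then some (g k) else none := by
  induction L with
  | nil => simp [PySem.Dict.get?]
  | cons y t ih =>
    rw [List.map_cons, PySem.Dict.get?_mk_cons]
    by_cases hy : (y == k) = true
    · have : y = k := by simpa using hy
      subst this
      simp
    · have hyk : ¬ y = k := by simpa using hy
      have hky : ¬ k = y := fun h => hyk h.symm
      simp [hy, ih, hky]

-- replacing the (unique) entry at k by the value it already has is the identity
theorem pv_replace_self {β : Type} (l : List (String × β)) (k : String) (v : β)
    (hnd : (l.map Prod.fst).Nodup) (h : (PySem.Dict.mk l).get? k = some v) :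
    l.map (fun p => if p.1 == k then (k, v) else p) = l := by
  induction l with
  | nil => simp [PySem.Dict.get?] at h
  | cons p t ih =>
    rw [PySem.Dict.get?_mk_cons] at h
    simp only [List.map_cons, List.nodup_cons] at hnd
    by_cases hk : (p.1 == k) = true
    · rw [if_pos hk] at h
      have hk' : p.1 = k := by simpa using hk
      have ht : t.map (fun q => if q.1 == k then (k, v) else q) = t := by
        calc t.map (fun q => if q.1 == k then (k, v) else q) = t.map id := by
              apply List.map_congr_left
              intro q hq
              have hne : q.1 ≠ k := by
                intro hqk
                exact hnd.1 (hk' ▸ hqk ▸ List.mem_map_of_mem (f := Prod.fst) hq)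
              simp [hne]
          _ = t := List.map_id t
      simp only [List.map_cons, if_pos hk, ht]
      obtain ⟨rfl⟩ := h
      simp [← hk']
    · rw [if_neg hk] at h
      simp only [List.map_cons, if_neg hk]
      rw [ih hnd.2 h]

-- min over a group extended on the right = A's running-minimum update
theorem pv_min_append (fs : List String) (x cur : String)
    (h : PySem.List.min? fs (fun s => s.toList) = some cur) :
    PySem.List.min? (fs ++ [x]) (fun s => s.toList)
      = some (if x.toList < cur.toList then x else cur) := by
  simp only [PySem.List.min?] at h ⊢
  rw [List.foldl_append, h]
  simp only [List.foldl_cons, List.foldl_nil]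
  split <;> rfl

-- the group minimum after appending one folder
theorem pv_pvM_append_ne (F : List String) (x l : String) (h : ¬ pvLeaf x = l) :
    pvM (F ++ [x]) l = pvM F l := by
  simp [pvM, List.filter_append, h]

theorem pv_pvM_append_new (F : List String) (x : String) (h : ¬ pvLeaf x ∈ F.map pvLeaf) :
    pvM (F ++ [x]) (pvLeaf x) = x := by
  have hf : F.filter (fun f => pvLeaf f == pvLeaf x) = [] := by
    rw [List.filter_eq_nil_iff]
    intro f hf hl
    exact h (List.mem_map.mpr ⟨f, hf, by simpa using hl⟩)
  simp [pvM, List.filter_append, hf, PySem.List.min?]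

theorem pv_pvM_append_old (F : List String) (x : String) (h : pvLeaf x ∈ F.map pvLeaf) :
    pvM (F ++ [x]) (pvLeaf x)
      = if x.toList < (pvM F (pvLeaf x)).toList then x else pvM F (pvLeaf x) := by
  have hne : F.filter (fun f => pvLeaf f == pvLeaf x) ≠ [] := by
    obtain ⟨f, hf, hl⟩ := List.mem_map.mp h
    intro hnil
    have : f ∈ F.filter (fun f => pvLeaf f == pvLeaf x) :=
      List.mem_filter.mpr ⟨hf, by simp [hl]⟩
    simp [hnil] at this
  obtain ⟨cur, hcur⟩ : ∃ c, PySem.List.min? (F.filter (fun f => pvLeaf f == pvLeaf x))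
      (fun s => s.toList) = some c := by
    cases hm : PySem.List.min? (F.filter (fun f => pvLeaf f == pvLeaf x)) (fun s => s.toList) with
    | none => exact absurd ((PySem.List.min?_eq_none_iff _ _).mp hm) hne
    | some c => exact ⟨c, rfl⟩
  have hM : pvM F (pvLeaf x) = cur := by simp [pvM, hcur]
  simp [pvM, List.filter_append, pv_min_append _ x cur hcur, hcur]

-- characterization of A's fold over the plain folder list
def pvStepF (index : PySem.Dict String String) (folder : String) : PySem.Dict String String :=
  match index.get? (pvLeaf folder) with
  | none => index.insert (pvLeaf folder) folder
  | some cur =>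
    if PySem.Chars.strLt folder.toList cur.toList then index.insert (pvLeaf folder) folder
    else index

theorem pv_A_char (F : List String) :
    F.foldl pvStepF PySem.Dict.empty
      = PySem.Dict.mk ((pvDedup (F.map pvLeaf)).map (fun l => (l, pvM F l))) := by
  induction F using List.reverseRecOn with
  | nil => rfl
  | append_singleton F x ih =>
    rw [List.foldl_append, List.foldl_cons, List.foldl_nil, ih]
    have hmapapp : (F ++ [x]).map pvLeaf = F.map pvLeaf ++ [pvLeaf x] := by simp
    have hget := pv_get?_mk_mapfun (pvM F) (pvDedup (F.map pvLeaf)) (pvLeaf x)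
    by_cases hmem : pvLeaf x ∈ F.map pvLeaf
    · -- leaf already present: A overwrites with the running min
      have hmemD : pvLeaf x ∈ pvDedup (F.map pvLeaf) := (pv_mem_dedup _ _).mpr hmem
      rw [if_pos hmemD] at hget
      have hdd : pvDedup ((F ++ [x]).map pvLeaf) = pvDedup (F.map pvLeaf) := by
        rw [hmapapp, pv_dedup_append, if_pos hmemD]
      have hval : pvM (F ++ [x]) (pvLeaf x)
          = if x.toList < (pvM F (pvLeaf x)).toList then x else pvM F (pvLeaf x) :=
        pv_pvM_append_old F x hmem
      have hmaps : (pvDedup ((F ++ [x]).map pvLeaf)).map (fun l => (l, pvM (F ++ [x]) l))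
          = (pvDedup (F.map pvLeaf)).map
              (fun l => if l == pvLeaf x then (pvLeaf x, pvM (F ++ [x]) (pvLeaf x)) else (l, pvM F l)) := by
        rw [hdd]
        apply List.map_congr_left
        intro l _
        by_cases hl : l = pvLeaf x
        · simp [hl]
        · have : ¬ pvLeaf x = l := fun h => hl h.symm
          simp [hl, pv_pvM_append_ne F x l this]
      unfold pvStepF
      rw [hget]
      by_cases hlt : PySem.Chars.strLt x.toList (pvM F (pvLeaf x)).toList = true
      · have hlt' : x.toList < (pvM F (pvLeaf x)).toList := by
          simpa [PySem.Chars.strLt] using hlt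
        have hc : (PySem.Dict.mk ((pvDedup (F.map pvLeaf)).map (fun l => (l, pvM F l)))).contains (pvLeaf x) = true := by
          rw [PySem.Dict.contains_eq_isSome_get?, hget]; rfl
        simp only [hlt, if_true, PySem.Dict.insert, hc]
        apply PySem.Dict.ext
        simp only [hmaps, hval, if_pos hlt']
        simp only [List.map_map]
        apply (List.map_congr_left _).symm
        intro l _
        by_cases hl : l = pvLeaf x <;> simp [Function.comp, hl]
      · have hlt' : ¬ x.toList < (pvM F (pvLeaf x)).toList := by
          simpa [PySem.Chars.strLt] using hlt
        simp only [hlt]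
        apply PySem.Dict.ext
        simp only [hmaps, hval, if_neg hlt']
        apply (List.map_congr_left _).symm
        intro l _
        by_cases hl : l = pvLeaf x <;> simp [hl]
    · -- new leaf: A appends it with this folder
      have hmemD : ¬ pvLeaf x ∈ pvDedup (F.map pvLeaf) := fun h => hmem ((pv_mem_dedup _ _).mp h)
      rw [if_neg hmemD] at hget
      have hdd : pvDedup ((F ++ [x]).map pvLeaf) = pvDedup (F.map pvLeaf) ++ [pvLeaf x] := by
        rw [hmapapp, pv_dedup_append, if_neg hmemD]
      have hc : (PySem.Dict.mk ((pvDedup (F.map pvLeaf)).map (fun l => (l, pvM F l)))).contains (pvLeaf x) = false := by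
        rw [PySem.Dict.contains_eq_isSome_get?, hget]; rfl
      unfold pvStepF
      rw [hget]
      simp only [PySem.Dict.insert, hc, Bool.false_eq_true, if_false]
      apply PySem.Dict.ext
      simp only [List.map_append, List.map_cons, List.map_nil, pv_dedup_append, if_neg hmemD]
      congr 1
      · apply List.map_congr_left
        intro l hl
        have : ¬ pvLeaf x = l := by
          intro h
          exact hmem (h ▸ (pv_mem_dedup _ _).mp hl)
        simp [pv_pvM_append_ne F x l this]
      · simp [pv_pvM_append_new F x hmem]

-- characterization of B's comprehension fold (any fixed value function g)
theorem pv_B_char (g : String → String) (L : List String) :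
    L.foldl (fun d l => d.insert l (g l)) PySem.Dict.empty
      = PySem.Dict.mk ((pvDedup L).map (fun l => (l, g l))) := by
  induction L using List.reverseRecOn with
  | nil => rfl
  | append_singleton L x ih =>
    rw [List.foldl_append, List.foldl_cons, List.foldl_nil, ih]
    have hget := pv_get?_mk_mapfun g (pvDedup L) x
    by_cases hmem : x ∈ pvDedup L
    · rw [if_pos hmem] at hget
      have hc : (PySem.Dict.mk ((pvDedup L).map (fun l => (l, g l)))).contains x = true := by
        rw [PySem.Dict.contains_eq_isSome_get?, hget]; rfl
      have hnd : (((pvDedup L).map (fun l => (l, g l))).map Prod.fst).Nodup := by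
        have hcomp : (Prod.fst ∘ fun l : String => (l, g l)) = id := rfl
        rw [List.map_map, hcomp, List.map_id]
        exact pv_nodup_dedup L
      rw [pv_dedup_append, if_pos hmem]
      simp only [PySem.Dict.insert, hc, if_true]
      exact congrArg PySem.Dict.mk (pv_replace_self _ x (g x) hnd hget)
    · rw [if_neg hmem] at hget
      have hc : (PySem.Dict.mk ((pvDedup L).map (fun l => (l, g l)))).contains x = false := by
        rw [PySem.Dict.contains_eq_isSome_get?, hget]; rfl
      rw [pv_dedup_append, if_neg hmem]
      simp [PySem.Dict.insert, hc]

-- zip-with-leaves filtering is plain filtering on the folders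
theorem pv_zip_filter (F : List String) (l : String) :
    ((F.zip (F.map pvLeaf)).filter (fun p => p.2 == l)).map Prod.fst
      = F.filter (fun f => pvLeaf f == l) := by
  induction F with
  | nil => rfl
  | cons f t ih =>
    simp only [List.map_cons, List.zip_cons_cons, List.filter_cons]
    by_cases h : (pvLeaf f == l) = true
    · simp [h, ih]
    · simp [h, ih]

-- A's per-rule step factored through the truthy move_to extraction
theorem pv_stepA_none (d : PySem.Dict String String) (rule : List (String × String))
    (h : pvMoveTo rule = none) : pvStepA d rule = d := by
  unfold pvMoveTo at h
  unfold pvStepA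
  cases hg : (PySem.Dict.mk rule).get? "move_to" with
  | none => rfl
  | some folder =>
    rw [hg] at h
    have h' : (if folder = "" then none else some folder) = (none : Option String) := h
    by_cases hf : folder = ""
    · simp [hf]
    · rw [if_neg hf] at h'
      exact absurd h' (by simp)

theorem pv_stepA_some (d : PySem.Dict String String) (rule : List (String × String))
    (f : String) (h : pvMoveTo rule = some f) : pvStepA d rule = pvStepF d f := by
  unfold pvMoveTo at h
  cases hg : (PySem.Dict.mk rule).get? "move_to" with
  | none => rw [hg] at h; exact absurd h (by simp)
  | some folder =>
    rw [hg] at h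
    have h' : (if folder = "" then none else some folder) = some f := h
    by_cases hf : folder = ""
    · rw [if_pos hf] at h'
      exact absurd h' (by simp)
    · rw [if_neg hf] at h'
      injection h' with hfo
      subst hfo
      unfold pvStepA pvStepF
      rw [hg]
      simp [hf]

-- A's fold over the rules = the running-minimum fold over the truthy folders
theorem pv_foldA (rules : List (List (String × String))) :
    ∀ d, rules.foldl pvStepA d = (rules.filterMap pvMoveTo).foldl pvStepF d := by
  induction rules with
  | nil => intro d; rfl
  | cons r t ih =>
    intro d
    rw [List.foldl_cons, List.filterMap_cons]
    cases h : pvMoveTo r with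
    | none => rw [pv_stepA_none d r h, ih]
    | some f => rw [pv_stepA_some d r f h, List.foldl_cons, ih]

-- ===== VERDICT (by name: the statement is the Claim_ definition above) =====
theorem build_sender_index_spec : Claim_equal_build_sender_index := by
  intro config _
  unfold Spec_build_sender_index build_sender_index build_sender_index_alt
  show (((PySem.Dict.mk config).getD "rules" []).foldl pvStepA PySem.Dict.empty).items
      = (((((PySem.Dict.mk config).getD "rules" []).filterMap pvMoveTo).map pvLeaf).foldl
          (fun d leaf => d.insert leaf
            (pvGroupMin (((PySem.Dict.mk config).getD "rules" []).filterMap pvMoveTo)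
              ((((PySem.Dict.mk config).getD "rules" []).filterMap pvMoveTo).map pvLeaf) leaf))
          PySem.Dict.empty).items
  generalize (PySem.Dict.mk config).getD "rules" [] = rules
  have hA : rules.foldl pvStepA PySem.Dict.empty
      = (rules.filterMap pvMoveTo).foldl pvStepF PySem.Dict.empty :=
    pv_foldA rules PySem.Dict.empty
  have hB : ((rules.filterMap pvMoveTo).map pvLeaf).foldl
        (fun d leaf => d.insert leaf
          (pvGroupMin (rules.filterMap pvMoveTo) ((rules.filterMap pvMoveTo).map pvLeaf) leaf))
        PySem.Dict.empty
      = ((rules.filterMap pvMoveTo).map pvLeaf).foldl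
        (fun d leaf => d.insert leaf (pvM (rules.filterMap pvMoveTo) leaf)) PySem.Dict.empty := by
    apply PySem.List.foldl_congr_mem
    intro d l _
    rw [pvGroupMin, pv_zip_filter, ← pvM]
  rw [hA, hB, pv_A_char, pv_B_char]
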